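-- pv_equiv track=rewrite | github.com/ulyana-3107/Studying | OS/files/main.py | octal2bin
-- ===== SOURCE A (Python) =====
-- from collections import deque
--
-- def int2bin(num: int) -> list:
--     bin = deque([])
--
--     while num > 0:
--         bin.appendleft(num % 2)
--         num = num // 2
--
--     return list(bin)
--
-- def octal2bin(oct: int) -> list:
--     nums = [int(i) for i in str(oct)]
--     bin_nums = []
--
--     for num in nums:
--         if num > 7:
--             raise ValueError('Incorrect data was given')
--
--         bins = int2bin(num)
--
--         if len(bins) < 3:
--             bins = [0] * (3 - len(bins)) + bins
--
--         bin_nums.extend(bins)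
--
--     return bin_nums
-- ===== SOURCE B (Python) =====
-- _BITS = {'0': [0, 0, 0], '1': [0, 0, 1], '2': [0, 1, 0], '3': [0, 1, 1],
--          '4': [1, 0, 0], '5': [1, 0, 1], '6': [1, 1, 0], '7': [1, 1, 1]}
--
-- def octal2bin(oct: int) -> list:
--     bits = []
--     for c in str(oct):
--         if c not in _BITS:
--             raise ValueError('Incorrect data was given')
--         bits += _BITS[c]
--     return bits
-- ===== Notes on version B (the rewrite author's own statement) =====
-- stated objective: idiomatic
-- what changed: B replaces A's per-digit repeated-division loop (int2bin) plus zero-padding with a fixed table mapping each decimal-digit character '0'-'7' directly to its 3-bit group, appended in one pass over str(oct).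
import Mathlib
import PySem

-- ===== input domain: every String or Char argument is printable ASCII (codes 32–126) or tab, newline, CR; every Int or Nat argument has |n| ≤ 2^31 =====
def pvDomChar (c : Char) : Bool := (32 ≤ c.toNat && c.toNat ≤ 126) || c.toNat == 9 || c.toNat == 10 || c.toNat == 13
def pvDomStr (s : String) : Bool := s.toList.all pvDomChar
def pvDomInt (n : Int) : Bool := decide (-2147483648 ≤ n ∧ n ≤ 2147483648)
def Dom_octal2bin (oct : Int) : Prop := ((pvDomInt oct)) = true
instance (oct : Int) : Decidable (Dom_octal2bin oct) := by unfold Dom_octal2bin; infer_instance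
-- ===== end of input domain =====

-- B replaces the per-digit division loop and padding of A by a fixed table keyed by the
-- decimal-digit character, giving each octal digit its 3-bit group directly (idiomatic, table-driven).

-- ===== PORT A =====
-- helper int2bin: `while num > 0: bin.appendleft(num % 2); num = num // 2`
def int2bin (num : Int) : List Int :=
  int2binLoop num []
where
  int2binLoop (num : Int) (acc : List Int) : List Int :=
    if num > 0 then
      int2binLoop (PySem.Int.floordiv num 2) (PySem.Int.mod num 2 :: acc)
    else acc
  termination_by num.toNat
  decreasing_by
    have h2 : PySem.Int.floordiv num 2 = num / 2 :=
      PySem.Int.floordiv_eq_ediv_of_pos (by omega)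
    rw [h2]; omega

def octal2bin (oct : Int) : List Int :=
  -- nums = [int(i) for i in str(oct)]; on a non-digit char Python raises (excluded by Pre_),
  -- here ofChars? returns none and we take 0 in that unreachable case
  let nums := (PySem.Int.toChars oct).map (fun c => (PySem.Int.ofChars? [c]).getD 0)
  nums.foldl
    (fun acc num =>
      if num > 7 then acc   -- Python: raise ValueError (excluded by Pre_)
      else
        let bins := int2bin num
        let bins := if bins.length < 3 then List.replicate (3 - bins.length) 0 ++ bins else bins
        acc ++ bins)
    []

-- ===== PORT B =====
def pvBitsTable (c : Char) : List Int :=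
  if c = '0' then [0, 0, 0] else if c = '1' then [0, 0, 1]
  else if c = '2' then [0, 1, 0] else if c = '3' then [0, 1, 1]
  else if c = '4' then [1, 0, 0] else if c = '5' then [1, 0, 1]
  else if c = '6' then [1, 1, 0] else if c = '7' then [1, 1, 1]
  else []   -- Python: `c not in _BITS` raises ValueError (excluded by Pre_)

def octal2bin_alt (oct : Int) : List Int :=
  (PySem.Int.toChars oct).foldl (fun acc c => acc ++ pvBitsTable c) []

-- ===== PRECONDITION & SPEC =====
-- Pre_ excludes exactly the inputs on which A raises ValueError: a negative oct (int('-') fails)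
-- or a decimal digit 8 or 9 (A's explicit raise).
def Pre_octal2bin (oct : Int) : Prop :=
  ((PySem.Int.toChars oct).all
    (fun c => ['0', '1', '2', '3', '4', '5', '6', '7'].contains c)) = true
instance (oct : Int) : Decidable (Pre_octal2bin oct) := by unfold Pre_octal2bin; infer_instance
def pvWitness_octal2bin : Int := (107)

def Spec_octal2bin (oct : Int) (out : List Int) : Prop := out = octal2bin_alt oct
instance (oct : Int) (out : List Int) : Decidable (Spec_octal2bin oct out) := by unfold Spec_octal2bin; infer_instance

-- ===== CLAIM (what is proved, stated in full; the proofs are below) =====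
def Claim_equal_octal2bin : Prop :=
  ∀ (oct : Int), Dom_octal2bin oct → Pre_octal2bin oct → Spec_octal2bin oct (octal2bin oct)

-- ===== LEMMAS AND PROOFS =====

-- one unfolding of A's inner while-loop (the definition is by well-founded recursion)
theorem pv_loop_unfold (n : Int) (acc : List Int) :
    int2bin.int2binLoop n acc =
      if n > 0 then int2bin.int2binLoop (PySem.Int.floordiv n 2) (PySem.Int.mod n 2 :: acc)
      else acc := by rw [int2bin.int2binLoop]

-- evaluation of int2bin on the eight octal digit values
theorem pv_i2b0 : int2bin 0 = [] := by rw [int2bin, pv_loop_unfold]; norm_num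
theorem pv_i2b1 : int2bin 1 = [1] := by
  rw [int2bin, pv_loop_unfold, pv_loop_unfold]
  norm_num [PySem.Int.floordiv_eq_ediv_of_pos, PySem.Int.mod_eq_emod_of_pos]
theorem pv_i2b2 : int2bin 2 = [1, 0] := by
  rw [int2bin, pv_loop_unfold, pv_loop_unfold, pv_loop_unfold]
  norm_num [PySem.Int.floordiv_eq_ediv_of_pos, PySem.Int.mod_eq_emod_of_pos]
theorem pv_i2b3 : int2bin 3 = [1, 1] := by
  rw [int2bin, pv_loop_unfold, pv_loop_unfold, pv_loop_unfold]
  norm_num [PySem.Int.floordiv_eq_ediv_of_pos, PySem.Int.mod_eq_emod_of_pos]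
theorem pv_i2b4 : int2bin 4 = [1, 0, 0] := by
  rw [int2bin, pv_loop_unfold, pv_loop_unfold, pv_loop_unfold, pv_loop_unfold]
  norm_num [PySem.Int.floordiv_eq_ediv_of_pos, PySem.Int.mod_eq_emod_of_pos]
theorem pv_i2b5 : int2bin 5 = [1, 0, 1] := by
  rw [int2bin, pv_loop_unfold, pv_loop_unfold, pv_loop_unfold, pv_loop_unfold]
  norm_num [PySem.Int.floordiv_eq_ediv_of_pos, PySem.Int.mod_eq_emod_of_pos]
theorem pv_i2b6 : int2bin 6 = [1, 1, 0] := by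
  rw [int2bin, pv_loop_unfold, pv_loop_unfold, pv_loop_unfold, pv_loop_unfold]
  norm_num [PySem.Int.floordiv_eq_ediv_of_pos, PySem.Int.mod_eq_emod_of_pos]
theorem pv_i2b7 : int2bin 7 = [1, 1, 1] := by
  rw [int2bin, pv_loop_unfold, pv_loop_unfold, pv_loop_unfold, pv_loop_unfold]
  norm_num [PySem.Int.floordiv_eq_ediv_of_pos, PySem.Int.mod_eq_emod_of_pos]

-- int('c') for the eight admitted characters
theorem pv_ofc0 : (PySem.Int.ofChars? ['0']).getD 0 = (0 : Int) := by decide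
theorem pv_ofc1 : (PySem.Int.ofChars? ['1']).getD 0 = (1 : Int) := by decide
theorem pv_ofc2 : (PySem.Int.ofChars? ['2']).getD 0 = (2 : Int) := by decide
theorem pv_ofc3 : (PySem.Int.ofChars? ['3']).getD 0 = (3 : Int) := by decide
theorem pv_ofc4 : (PySem.Int.ofChars? ['4']).getD 0 = (4 : Int) := by decide
theorem pv_ofc5 : (PySem.Int.ofChars? ['5']).getD 0 = (5 : Int) := by decide
theorem pv_ofc6 : (PySem.Int.ofChars? ['6']).getD 0 = (6 : Int) := by decide
theorem pv_ofc7 : (PySem.Int.ofChars? ['7']).getD 0 = (7 : Int) := by decide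

-- per-character agreement of the two loop bodies, for the eight admitted digit characters
theorem pv_step_eq (c : Char) (hc : c ∈ ['0', '1', '2', '3', '4', '5', '6', '7']) :
    (let num := (PySem.Int.ofChars? [c]).getD 0
     if num > 7 then ([] : List Int)
     else
       let bins := int2bin num
       if bins.length < 3 then List.replicate (3 - bins.length) 0 ++ bins else bins)
    = pvBitsTable c := by
  fin_cases hc <;>
    norm_num [pv_ofc0, pv_ofc1, pv_ofc2, pv_ofc3, pv_ofc4, pv_ofc5, pv_ofc6, pv_ofc7,
      pv_i2b0, pv_i2b1, pv_i2b2, pv_i2b3, pv_i2b4, pv_i2b5, pv_i2b6, pv_i2b7, pvBitsTable,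
      List.replicate] <;> decide

theorem pv_fold_eq (l : List Char) (hl : ∀ c ∈ l, c ∈ ['0', '1', '2', '3', '4', '5', '6', '7']) :
    ∀ acc : List Int,
      (l.map (fun c => (PySem.Int.ofChars? [c]).getD 0)).foldl
        (fun acc num =>
          if num > 7 then acc
          else
            let bins := int2bin num
            let bins := if bins.length < 3 then List.replicate (3 - bins.length) 0 ++ bins else bins
            acc ++ bins)
        acc
      = l.foldl (fun acc c => acc ++ pvBitsTable c) acc := by
  induction l with
  | nil => intro acc; rfl
  | cons c l ih =>
    intro acc
    have hc := hl c (List.mem_cons_self)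
    have hstep := pv_step_eq c hc
    simp only [List.map_cons, List.foldl_cons]
    rw [ih (fun x hx => hl x (List.mem_cons_of_mem _ hx))]
    congr 1
    simp only at hstep
    by_cases hnum : ((PySem.Int.ofChars? [c]).getD 0) > 7
    · simp only [if_pos hnum] at hstep ⊢
      rw [← hstep, List.append_nil]
    · simp only [if_neg hnum] at hstep ⊢
      rw [← hstep]

-- ===== VERDICT (by name: the statement is the Claim_ definition above) =====
theorem octal2bin_spec : Claim_equal_octal2bin := by
  intro oct _ hpre
  unfold Spec_octal2bin octal2bin octal2bin_alt
  refine pv_fold_eq (PySem.Int.toChars oct) ?_ []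
  intro c hc
  have h := List.all_eq_true.mp hpre c hc
  simpa using h
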